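-- pv_equiv track=rewrite | github.com/joshanashakya/dissertation | workspace/dataset/java-python/GeeksForGeeks/1130/A/2.py | countIntegralSolutions
-- ===== SOURCE A (Python) =====
-- def countIntegralSolutions (n):
--
--     # Initialize result
--     result = 0
--
--     # Consider all triplets and
--     # increment result whenever
--     # sum of a triplet is n.
--     for i in range(n + 1):
--         for j in range(n + 1):
--             for k in range(n + 1):
--                 if i + j + k == n:
--                     result += 1
--
--     return result
-- ===== SOURCE B (Python) =====
-- def countIntegralSolutions(n):
--     # Closed form: number of nonnegative (i, j, k) with i+j+k == n is C(n+2, 2).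
--     if n < 0:
--         return 0
--     return (n + 1) * (n + 2) // 2
-- ===== Notes on version B (the rewrite author's own statement) =====
-- stated objective: faster
-- what changed: Replaced the triple nested loop that tests every (i,j,k) with the closed-form stars-and-bars count (n+1)(n+2)/2 (0 for negative n).
import Mathlib
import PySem

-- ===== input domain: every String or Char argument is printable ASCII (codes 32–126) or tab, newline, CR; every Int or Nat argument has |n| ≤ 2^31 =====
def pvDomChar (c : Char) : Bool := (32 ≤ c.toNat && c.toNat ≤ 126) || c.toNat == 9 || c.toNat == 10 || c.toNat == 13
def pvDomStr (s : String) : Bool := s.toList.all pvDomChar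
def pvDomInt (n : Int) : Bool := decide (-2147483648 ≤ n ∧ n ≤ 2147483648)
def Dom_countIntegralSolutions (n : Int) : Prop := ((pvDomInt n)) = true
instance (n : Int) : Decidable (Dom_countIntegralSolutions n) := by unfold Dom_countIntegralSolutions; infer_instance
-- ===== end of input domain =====

-- B replaces A's O(n^3) triple loop by the closed-form stars-and-bars count (n+1)(n+2)//2 (0 for n < 0): asymptotically faster.

-- ===== PORT A =====
def countIntegralSolutions (n : Int) : Int :=
  (PySem.List.pyRange 0 (n + 1) 1).foldl (fun result i =>
    (PySem.List.pyRange 0 (n + 1) 1).foldl (fun result j =>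
      (PySem.List.pyRange 0 (n + 1) 1).foldl (fun result k =>
        if i + j + k = n then result + 1 else result) result) result) 0

-- ===== PORT B =====
def countIntegralSolutions_alt (n : Int) : Int :=
  if n < 0 then 0 else PySem.Int.floordiv ((n + 1) * (n + 2)) 2

-- ===== PRECONDITION & SPEC =====
def Spec_countIntegralSolutions (n : Int) (out : Int) : Prop := out = countIntegralSolutions_alt n
instance (n : Int) (out : Int) : Decidable (Spec_countIntegralSolutions n out) := by unfold Spec_countIntegralSolutions; infer_instance

-- ===== CLAIM (what is proved, stated in full; the proofs are below) =====
def Claim_equal_countIntegralSolutions : Prop := ∀ (n : Int), Dom_countIntegralSolutions n → Spec_countIntegralSolutions n (countIntegralSolutions n)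

-- ===== LEMMAS AND PROOFS =====

-- The innermost loop adds 1 exactly when k = n - i - j lies in [0, n+1): a 0/1 count over the range.
theorem pv_inner (n i j : Int) (acc : Int) :
    (PySem.List.pyRange 0 (n + 1) 1).foldl
      (fun result k => if i + j + k = n then result + 1 else result) acc
    = acc + (if 0 ≤ n - i - j ∧ n - i - j < n + 1 then 1 else 0) := by
  rw [PySem.List.foldl_ite_add_one]
  congr 1
  have h : (PySem.List.pyRange 0 (n + 1) 1).countP (fun k => decide (i + j + k = n))
      = (PySem.List.pyRange 0 (n + 1) 1).count (n - i - j) := by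
    rw [List.count, List.countP_congr]
    intro k _
    simp only [decide_eq_true_eq, beq_iff_eq]
    omega
  rw [h]
  by_cases hm : (n - i - j) ∈ PySem.List.pyRange 0 (n + 1) 1
  · have hb := PySem.List.mem_pyRange_one.mp hm
    rw [List.count_eq_one_of_mem (PySem.List.nodup_pyRange_one 0 (n + 1)) hm]
    have : 0 ≤ n - i - j ∧ n - i - j < n + 1 := ⟨hb.1, hb.2⟩
    rw [if_pos this]; norm_num
  · rw [List.count_eq_zero_of_not_mem hm]
    have hnb := fun h => hm (PySem.List.mem_pyRange_one.mpr h)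
    split_ifs with hc
    · exact absurd ⟨hc.1, hc.2⟩ hnb
    · rfl

-- The middle loop sums those indicators over j: max 0 (min (t+1) b) many j in [0, b) satisfy j ≤ t.
theorem pv_count_le (b t : Int) :
    ((PySem.List.pyRange 0 b 1).map (fun j => if j ≤ t then (1 : Int) else 0)).sum
    = max 0 (min (t + 1) b) := by
  by_cases hb : b ≤ 0
  · rw [PySem.List.pyRange_one_eq_nil hb]
    simp; omega
  · have hb' : 0 ≤ b - 1 := by omega
    have : b = (b - 1) + 1 := by omega
    rw [this, PySem.List.pyRange_one_succ_right (by omega)]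
    have ih := pv_count_le (b - 1) t
    rw [List.map_append, List.sum_append, ih]
    simp only [List.map_cons, List.map_nil, List.sum_cons, List.sum_nil]
    split_ifs with hlt <;> omega
termination_by (b.toNat)
decreasing_by omega

-- Gauss: twice the sum of (c - i) over i ∈ [0, b) is 2*c*b - b*(b-1).
theorem pv_gauss (b c : Int) (hb : 0 ≤ b) :
    2 * ((PySem.List.pyRange 0 b 1).map (fun i => c - i)).sum = 2 * c * b - b * (b - 1) := by
  by_cases hb0 : b ≤ 0
  · rw [PySem.List.pyRange_one_eq_nil hb0]
    have : b = 0 := le_antisymm hb0 hb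
    simp [this]
  · have : b = (b - 1) + 1 := by omega
    rw [this, PySem.List.pyRange_one_succ_right (by omega)]
    have ih := pv_gauss (b - 1) c (by omega)
    rw [List.map_append, List.sum_append]
    simp only [List.map_cons, List.map_nil, List.sum_cons, List.sum_nil]
    ring_nf
    ring_nf at ih
    omega
termination_by (b.toNat)
decreasing_by omega

-- ===== VERDICT (by name: the statement is the Claim_ definition above) =====
theorem countIntegralSolutions_spec : Claim_equal_countIntegralSolutions := by
  intro n _
  unfold Spec_countIntegralSolutions countIntegralSolutions countIntegralSolutions_alt
  by_cases hn : n < 0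
  · rw [PySem.List.pyRange_one_eq_nil (by omega)]
    simp [hn]
  · -- collapse the inner two loops
    have hmid : ∀ i : Int, 0 ≤ i → i < n + 1 → ∀ acc : Int,
        (PySem.List.pyRange 0 (n + 1) 1).foldl
          (fun result j => (PySem.List.pyRange 0 (n + 1) 1).foldl
            (fun result k => if i + j + k = n then result + 1 else result) result) acc
        = acc + (n + 1 - i) := by
      intro i hi0 hi1 acc
      have : ∀ acc : Int, (PySem.List.pyRange 0 (n + 1) 1).foldl
          (fun result j => (PySem.List.pyRange 0 (n + 1) 1).foldl
            (fun result k => if i + j + k = n then result + 1 else result) result) acc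
          = (PySem.List.pyRange 0 (n + 1) 1).foldl
            (fun result j => result + (if j ≤ n - i then 1 else 0)) acc := by
        intro acc
        apply PySem.List.foldl_congr_mem
        intro a j hj
        have hj' := PySem.List.mem_pyRange_one.mp hj
        rw [pv_inner]
        congr 1
        split_ifs with h1 h2 h3 <;> first | rfl | omega
      rw [this, PySem.List.foldl_add, pv_count_le]
      have : max 0 (min (n - i + 1) (n + 1)) = n + 1 - i := by omega
      omega
    have houter : ∀ acc : Int, (PySem.List.pyRange 0 (n + 1) 1).foldl
        (fun result i => (PySem.List.pyRange 0 (n + 1) 1).foldl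
          (fun result j => (PySem.List.pyRange 0 (n + 1) 1).foldl
            (fun result k => if i + j + k = n then result + 1 else result) result) result) acc
        = (PySem.List.pyRange 0 (n + 1) 1).foldl
          (fun result i => result + (n + 1 - i)) acc := by
      intro acc
      apply PySem.List.foldl_congr_mem
      intro a i hi
      have hi' := PySem.List.mem_pyRange_one.mp hi
      exact hmid i hi'.1 hi'.2 a
    rw [houter, PySem.List.foldl_add]
    have hval : 2 * ((PySem.List.pyRange 0 (n + 1) 1).map (fun i => n + 1 - i)).sum
        = (n + 1) * (n + 2) := by
      rw [pv_gauss (n + 1) (n + 1) (by omega)]; ring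
    rw [PySem.Int.floordiv_eq_ediv_of_pos (by omega)]
    simp only [hn, if_false]
    have hdiv : (n + 1) * (n + 2) / 2
        = ((PySem.List.pyRange 0 (n + 1) 1).map (fun i => n + 1 - i)).sum := by
      rw [← hval]
      exact Int.mul_ediv_cancel_left _ (by norm_num)
    rw [hdiv]
    exact zero_add _
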